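-- pv_equiv track=rewrite | github.com/erastov-alex/sly-convert | main.py | segmentation_data_fixer
-- ===== SOURCE A (Python) =====
-- def segmentation_data_fixer(segmentation):
--     segmentation_result=[]
--     list_hash = []
--     for i in range(len(segmentation[0])):
--         list_hash.append(segmentation[0][i])
--         if len(list_hash) == 2:
--             list_hash.reverse()
--             segmentation_result.append(list_hash)
--             list_hash=[]
--     return segmentation_result
-- ===== SOURCE B (Python) =====
-- def segmentation_data_fixer(segmentation):
--     s = segmentation[0]
--     return [[b, a] for a, b in zip(s[::2], s[1::2])]
-- ===== Notes on version B (the rewrite author's own statement) =====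
-- stated objective: idiomatic
-- what changed: Replaced the element-by-element scan with a flushing two-slot buffer by a single zip over the even- and odd-indexed slices, emitting each reversed pair directly.
import Mathlib
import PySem

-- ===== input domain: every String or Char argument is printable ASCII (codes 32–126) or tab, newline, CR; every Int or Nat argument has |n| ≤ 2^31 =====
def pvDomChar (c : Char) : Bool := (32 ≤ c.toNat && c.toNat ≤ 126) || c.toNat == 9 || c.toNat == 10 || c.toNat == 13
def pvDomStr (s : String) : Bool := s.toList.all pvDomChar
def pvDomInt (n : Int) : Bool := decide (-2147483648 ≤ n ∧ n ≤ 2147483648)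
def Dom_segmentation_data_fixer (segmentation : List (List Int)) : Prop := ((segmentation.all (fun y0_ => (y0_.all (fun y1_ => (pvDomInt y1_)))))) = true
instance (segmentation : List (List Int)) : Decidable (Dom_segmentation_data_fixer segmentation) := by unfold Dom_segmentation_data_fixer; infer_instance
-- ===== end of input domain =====

-- B builds the reversed pairs by zipping the even- and odd-indexed slices instead of
-- scanning element-by-element into a flushing two-slot buffer (idiomatic rewrite, same cost).

-- ===== PORT A =====
-- literal transliteration: for i in range(len(segmentation[0])), append to a 2-slot buffer, flush reversed
def segmentation_data_fixer (segmentation : List (List Int)) : List (List Int) :=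
  let s0 := segmentation.headD []   -- segmentation[0]; Pre_ excludes [], where Python raises IndexError
  (((List.range s0.length).foldl (fun (st : List (List Int) × List Int) (i : Nat) =>
      let list_hash := st.2 ++ [(PySem.List.pyGet? s0 (i : Int)).getD 0]  -- index always in range here
      if list_hash.length = 2 then (st.1 ++ [list_hash.reverse], [])
      else (st.1, list_hash))
    ([], [])).1)

-- ===== PORT B =====
-- literal transliteration of Source B: [[b, a] for a, b in zip(s[::2], s[1::2])]
def segmentation_data_fixer_alt (segmentation : List (List Int)) : List (List Int) :=
  let s := segmentation.headD []    -- segmentation[0]; Pre_ excludes [], where Python raises IndexError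
  (((PySem.List.slice? s none none 2).getD []).zip
    ((PySem.List.slice? s (some 1) none 2).getD [])).map (fun p => [p.2, p.1])

-- ===== PRECONDITION & SPEC =====
-- Pre_ excludes only the empty outer list, on which Python A (and B) raises IndexError at segmentation[0].
def Pre_segmentation_data_fixer (segmentation : List (List Int)) : Prop := segmentation ≠ []
instance (segmentation : List (List Int)) : Decidable (Pre_segmentation_data_fixer segmentation) := by unfold Pre_segmentation_data_fixer; infer_instance
def pvWitness_segmentation_data_fixer : List (List Int) := [[1, 2, 3, 4, 5]]

def Spec_segmentation_data_fixer (segmentation : List (List Int)) (out : List (List Int)) : Prop := out = segmentation_data_fixer_alt segmentation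
instance (segmentation : List (List Int)) (out : List (List Int)) : Decidable (Spec_segmentation_data_fixer segmentation out) := by unfold Spec_segmentation_data_fixer; infer_instance

-- ===== CLAIM (what is proved, stated in full; the proofs are below) =====
def Claim_equal_segmentation_data_fixer : Prop := ∀ (segmentation : List (List Int)), Dom_segmentation_data_fixer segmentation → Pre_segmentation_data_fixer segmentation → Spec_segmentation_data_fixer segmentation (segmentation_data_fixer segmentation)

-- ===== LEMMAS AND PROOFS =====

-- the common reference value: the reversed consecutive pairs of a list
def pairsA : List Int → List (List Int)
  | a :: b :: t => [b, a] :: pairsA t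
  | _ => []

-- the even-indexed elements of a list
def evens : List Int → List Int
  | [] => []
  | [a] => [a]
  | a :: _ :: t => a :: evens t

-- A's loop body on the current element
def stepE (st : List (List Int) × List Int) (x : Int) : List (List Int) × List Int :=
  let list_hash := st.2 ++ [x]
  if list_hash.length = 2 then (st.1 ++ [list_hash.reverse], []) else (st.1, list_hash)

-- folding l's elements fetched by index over range(len(l)) is folding over l
theorem foldl_range_pyGet {σ : Type} (l : List Int) (g : σ → Int → σ) :
    ∀ (init : σ),
      (List.range l.length).foldl (fun (st : σ) (i : Nat) => g st ((PySem.List.pyGet? l (i : Int)).getD 0)) init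
        = l.foldl g init := by
  induction l with
  | nil => intro init; simp
  | cons a t ih =>
    intro init
    simp only [List.length_cons, List.range_succ_eq_map, List.foldl_cons, List.foldl_map,
      PySem.List.pyGet?_natCast, List.getElem?_cons_zero, Option.getD_some, Nat.succ_eq_add_one,
      List.getElem?_cons_succ]
    have h := ih (g init a)
    simp only [PySem.List.pyGet?_natCast] at h
    exact h

-- A's buffer loop produces exactly the reversed consecutive pairs
theorem foldA (l : List Int) : ∀ (res : List (List Int)),
    (l.foldl stepE (res, [])).1 = res ++ pairsA l := by
  induction l using pairsA.induct with
  | case1 a b t ih =>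
    intro res
    simp only [List.foldl_cons, stepE]
    simp only [List.nil_append, List.length_cons, List.length_nil]
    norm_num
    rw [ih (res ++ [[b, a]])]
    simp [pairsA]
  | case2 l h => cases l with
    | nil => intro res; simp [pairsA]
    | cons a t =>
      cases t with
      | nil => intro res; simp [pairsA, stepE]
      | cons b t' => exact absurd rfl (h a b t')

theorem evens_cons_tail (b : Int) (t : List Int) : evens (b :: t) = b :: evens t.tail := by
  cases t <;> simp [evens]

-- the even-indexed elements, characterised by index fetches over range
theorem fmE (xs : List Int) :
    List.filterMap (fun k => xs[2 * k]?) (List.range ((xs.length + 1) / 2)) = evens xs := by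
  induction xs using evens.induct with
  | case1 => simp [evens]
  | case2 a => simp [evens]
  | case3 a b t ih =>
    have hlen : ((a :: b :: t).length + 1) / 2 = (t.length + 1) / 2 + 1 := by
      simp [List.length_cons]; omega
    rw [hlen, List.range_succ_eq_map]
    simp only [List.filterMap_cons, List.filterMap_map, Nat.mul_zero, List.getElem?_cons_zero,
      Nat.succ_eq_add_one, Function.comp]
    simp only [show ∀ k, 2 * (k + 1) = (2 * k + 1) + 1 from fun k => by ring,
      List.getElem?_cons_succ]
    rw [show evens (a :: b :: t) = a :: evens t from rfl, ← ih]

-- xs[::2] is the even-indexed elements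
theorem slice?Even (xs : List Int) :
    PySem.List.slice? xs none none 2 = some (evens xs) := by
  rw [← fmE]
  simp only [PySem.List.slice?, PySem.List.sliceIndices]
  norm_num
  have h1 : (if 0 < xs.length then (((xs.length : Int) + 2 - 1) / 2).toNat else 0) = (xs.length + 1) / 2 := by
    split_ifs with h <;> omega
  have h2 : ∀ x : Nat, (2 * (x : Int)).toNat = 2 * x := fun x => by omega
  simp only [h1, h2]

-- xs[1::2] is the even-indexed elements of the tail
theorem slice?Odd (xs : List Int) :
    PySem.List.slice? xs (some 1) none 2 = some (evens xs.tail) := by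
  rw [show evens xs.tail = List.filterMap (fun k => xs.tail[2 * k]?) (List.range ((xs.tail.length + 1) / 2)) from (fmE _).symm]
  simp only [PySem.List.slice?, PySem.List.sliceIndices]
  norm_num
  rcases Nat.eq_zero_or_pos xs.length with h | h
  · have hx : xs = [] := List.eq_nil_of_length_eq_zero h
    subst hx; simp
  · have hmin : min 1 (xs.length : Int) = 1 := by omega
    rw [hmin]
    have hc : (if 1 < xs.length then (((xs.length : Int) - 1 + 2 - 1) / 2).toNat else 0) = (xs.length - 1 + 1) / 2 := by
      split_ifs <;> omega
    have hi : ∀ x : Nat, ((1 : Int) + 2 * (x : Int)).toNat = 2 * x + 1 := fun x => by omega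
    simp only [hc, hi]

-- zipping the evens with the evens of the tail yields the reversed pairs
theorem zipPairs (xs : List Int) :
    ((evens xs).zip (evens xs.tail)).map (fun p => [p.2, p.1]) = pairsA xs := by
  induction xs using pairsA.induct with
  | case1 a b t ih =>
    rw [show evens (a :: b :: t) = a :: evens t from rfl,
        show (a :: b :: t).tail = b :: t from rfl, evens_cons_tail]
    simp only [List.zip_cons_cons, List.map_cons, ih]
    rfl
  | case2 l h =>
    cases l with
    | nil => simp [evens, pairsA]
    | cons a t =>
      cases t with
      | nil => simp [evens, pairsA]
      | cons b t' => exact absurd rfl (h a b t')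

theorem ports_agree (segmentation : List (List Int)) :
    segmentation_data_fixer segmentation = segmentation_data_fixer_alt segmentation := by
  simp only [segmentation_data_fixer, segmentation_data_fixer_alt]
  rw [slice?Even, slice?Odd]
  simp only [Option.getD_some, zipPairs]
  rw [show (fun (st : List (List Int) × List Int) (i : Nat) =>
      if (st.2 ++ [(PySem.List.pyGet? (segmentation.headD []) (i : Int)).getD 0]).length = 2 then
        (st.1 ++ [(st.2 ++ [(PySem.List.pyGet? (segmentation.headD []) (i : Int)).getD 0]).reverse], [])
      else (st.1, st.2 ++ [(PySem.List.pyGet? (segmentation.headD []) (i : Int)).getD 0]))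
      = (fun (st : List (List Int) × List Int) (i : Nat) => stepE st ((PySem.List.pyGet? (segmentation.headD []) (i : Int)).getD 0)) from rfl]
  rw [foldl_range_pyGet (segmentation.headD []) stepE ([], [])]
  exact foldA _ []

-- ===== VERDICT (by name: the statement is the Claim_ definition above) =====
theorem segmentation_data_fixer_spec : Claim_equal_segmentation_data_fixer := by
  intro segmentation _ _
  unfold Spec_segmentation_data_fixer
  exact ports_agree segmentation
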